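-- pv_equiv track=rewrite | github.com/CodeBoarding/CodeBoarding | static_analyzer/engine/adapters/cpp_cdb/bazel_generator.py | _find_source_argument
-- ===== SOURCE A (Python) =====
-- _SOURCE_SUFFIXES = (".cpp", ".cc", ".cxx", ".c++", ".c", ".m", ".mm")
--
-- def _find_source_argument(args: list[str]) -> str | None:
--     """First ``-c <file>`` pair wins; fall back to any positional source.
--
--     Bazel's C++ compile args usually look like:
--       ['external/.../clang', '-c', 'src/foo.cc', '-o', 'bazel-out/...', ...]
--     but user toolchains can rearrange — so if ``-c`` isn't present we
--     take the last source-suffixed arg as a heuristic.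
--     """
--     for i, arg in enumerate(args):
--         if arg == "-c" and i + 1 < len(args):
--             candidate = args[i + 1]
--             if candidate.endswith(_SOURCE_SUFFIXES):
--                 return candidate
--     output_values = {i + 1 for i, arg in enumerate(args[:-1]) if arg in ("-o", "--output")}
--     for i in range(len(args) - 1, -1, -1):
--         arg = args[i]
--         if i in output_values:
--             continue
--         if arg.endswith(_SOURCE_SUFFIXES) and not arg.startswith("-"):
--             return arg
--     return None
-- ===== SOURCE B (Python) =====
-- _SOURCE_SUFFIXES = (".cpp", ".cc", ".cxx", ".c++", ".c", ".m", ".mm")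
--
-- def _find_source_argument(args: list[str]) -> str | None:
--     """Single forward pass: return the argument right after the first valid
--     ``-c``; otherwise remember the last positional source-suffixed argument
--     (one not preceded by ``-o``/``--output``) and return it at the end."""
--     last_source = None
--     prev = None
--     for arg in args:
--         if prev == "-c" and arg.endswith(_SOURCE_SUFFIXES):
--             return arg
--         if prev not in ("-o", "--output") and arg.endswith(_SOURCE_SUFFIXES) and not arg.startswith("-"):
--             last_source = arg
--         prev = arg
--     return last_source
-- ===== Notes on version B (the rewrite author's own statement) =====
-- stated objective: simpler
-- what changed: Replaced A's second half (building the set of -o/--output successor indices plus a reverse index scan) with a single forward pass that returns at the first valid -c pair and otherwise keeps the last positional source argument in an accumulator.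
import Mathlib
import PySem

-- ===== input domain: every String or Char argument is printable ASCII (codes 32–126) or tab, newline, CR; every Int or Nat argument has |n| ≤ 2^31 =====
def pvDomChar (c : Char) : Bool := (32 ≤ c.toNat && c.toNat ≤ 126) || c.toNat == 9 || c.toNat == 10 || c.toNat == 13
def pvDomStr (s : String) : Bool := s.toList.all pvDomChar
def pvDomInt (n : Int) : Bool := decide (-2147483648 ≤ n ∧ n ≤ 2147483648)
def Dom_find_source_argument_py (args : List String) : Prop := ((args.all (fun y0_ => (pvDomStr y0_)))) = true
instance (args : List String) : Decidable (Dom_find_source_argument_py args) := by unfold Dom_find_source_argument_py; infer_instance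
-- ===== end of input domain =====

-- B replaces A's second phase (a set of `-o`-successor indices plus a reverse index scan)
-- by one forward pass keeping the last positional source argument; objective: simpler.
-- ===== PORT A =====

def srcSuffixes : List String := [".cpp", ".cc", ".cxx", ".c++", ".c", ".m", ".mm"]

-- arg.endswith(_SOURCE_SUFFIXES): True iff it ends with any of the tuple's suffixes
def endsSrc (s : String) : Bool := srcSuffixes.any (fun suf => PySem.Str.endswith s suf)

-- first loop: `for i, arg in enumerate(args)` — `i + 1 < len(args)` means the tail has a next element
def aFirstC : List String → Option String
  | a :: b :: rest => if a == "-c" && endsSrc b then some b else aFirstC (b :: rest)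
  | _ => none

-- {i + 1 for i, arg in enumerate(args[:-1]) if arg in ("-o", "--output")}
def outVals (args : List String) : PySem.Set Int :=
  PySem.Set.ofList
    ((PySem.List.enumerate (PySem.List.slice args none (some (-1)))).filterMap
      (fun p => if p.2 == "-o" || p.2 == "--output" then some (p.1 + 1) else none))

-- second loop: `for i in range(len(args) - 1, -1, -1)` with `arg = args[i]`
def aRevLoop (args : List String) (ov : PySem.Set Int) : List Int → Option String
  | [] => none
  | i :: rest =>
    match PySem.List.pyGet? args i with
    | none => none   -- unreachable: i is always in range
    | some arg =>
      if PySem.Set.contains ov i then aRevLoop args ov rest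
      else if endsSrc arg && !(PySem.Str.startswith arg "-") then some arg
      else aRevLoop args ov rest

def find_source_argument_py (args : List String) : Option String :=
  match aFirstC args with
  | some c => some c
  | none => aRevLoop args (outVals args) (PySem.List.pyRange ((args.length : Int) - 1) (-1) (-1))

-- ===== PORT B =====

-- single forward pass: `prev` is the previous argument, `last` the last positional source seen
def bLoop : List String → Option String → Option String → Option String
  | [], _, last => last
  | a :: rest, prev, last =>
    if prev == some "-c" && endsSrc a then some a
    else if !(prev == some "-o" || prev == some "--output") && endsSrc a
            && !(PySem.Str.startswith a "-")
    then bLoop rest (some a) (some a)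
    else bLoop rest (some a) last

def find_source_argument_py_alt (args : List String) : Option String := bLoop args none none

-- ===== PRECONDITION & SPEC =====
def Spec_find_source_argument_py (args : List String) (out : Option String) : Prop := out = find_source_argument_py_alt args
instance (args : List String) (out : Option String) : Decidable (Spec_find_source_argument_py args out) := by unfold Spec_find_source_argument_py; infer_instance

-- ===== CLAIM (what is proved, stated in full; the proofs are below) =====
def Claim_equal_find_source_argument_py : Prop := ∀ (args : List String), Dom_find_source_argument_py args → Spec_find_source_argument_py args (find_source_argument_py args)

-- ===== LEMMAS AND PROOFS =====

-- proof-side vocabulary -------------------------------------------------------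

def isOut (s : String) : Bool := s == "-o" || s == "--output"

-- first `-c` pair, tracking the previous argument
def fstC : Option String → List String → Option String
  | _, [] => none
  | prev, a :: rest => if prev == some "-c" && endsSrc a then some a else fstC (some a) rest

-- last "good" positional source, tracking the previous argument
def lastGood : Option String → List String → Option String
  | _, [] => none
  | prev, a :: rest =>
    match lastGood (some a) rest with
    | some x => some x
    | none =>
      if !(prev == some "-o" || prev == some "--output") && endsSrc a
          && !(PySem.Str.startswith a "-")
      then some a else none

-- index i is "good" in args
def goodIdx (args : List String) (i : Nat) : Bool :=
  (decide (i = 0) || !(isOut (args.getD (i - 1) ""))) && endsSrc (args.getD i "")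
    && !(PySem.Str.startswith (args.getD i "") "-")

-- first good index among m-1, m-2, …, s (value at it), none if absent
def gRev (args : List String) (s : Nat) : Nat → Option String
  | 0 => none
  | m + 1 =>
    if m + 1 ≤ s then none
    else if goodIdx args m then some (args.getD m "") else gRev args s m

def prevAt (args : List String) : Nat → Option String
  | 0 => none
  | s + 1 => some (args.getD s "")

-- B-side -----------------------------------------------------------------------

theorem bLoop_eq (l : List String) : ∀ (prev last : Option String),
    bLoop l prev last =
      match fstC prev l with
      | some c => some c
      | none => match lastGood prev l with
                | some x => some x
                | none => last := by
  induction l with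
  | nil => intro prev last; rfl
  | cons a rest ih =>
    intro prev last
    by_cases h : (prev == some "-c" && endsSrc a) = true
    · simp [bLoop, fstC, h]
    · rw [show bLoop (a :: rest) prev last
          = bLoop rest (some a)
              (if !(prev == some "-o" || prev == some "--output") && endsSrc a
                  && !(PySem.Str.startswith a "-") then some a else last) from by
            simp [bLoop, h]; split <;> simp]
      rw [ih]
      rw [show fstC prev (a :: rest) = fstC (some a) rest from by simp [fstC, h]]
      cases hf : fstC (some a) rest with
      | some c => rfl
      | none =>
        rw [show lastGood prev (a :: rest)
            = match lastGood (some a) rest with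
              | some x => some x
              | none =>
                if !(prev == some "-o" || prev == some "--output") && endsSrc a
                    && !(PySem.Str.startswith a "-") then some a else none from rfl]
        cases hl : lastGood (some a) rest with
        | some x => rfl
        | none =>
          cases hc : (!(prev == some "-o" || prev == some "--output") && endsSrc a
              && !(PySem.Str.startswith a "-")) with
          | true => simp
          | false => simp

-- A-side, first loop -----------------------------------------------------------

theorem aFirstC_eq_fstC_some (l : List String) : ∀ a, aFirstC (a :: l) = fstC (some a) l := by
  induction l with
  | nil => intro a; rfl
  | cons b rest ih =>
    intro a
    rw [show aFirstC (a :: b :: rest)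
        = if a == "-c" && endsSrc b then some b else aFirstC (b :: rest) from rfl]
    rw [ih b, show fstC (some a) (b :: rest)
        = if some a == some "-c" && endsSrc b then some b else fstC (some b) rest from rfl]
    simp

theorem aFirstC_eq_fstC (l : List String) : aFirstC l = fstC none l := by
  cases l with
  | nil => rfl
  | cons a rest => rw [aFirstC_eq_fstC_some rest a]; rfl

-- A-side, output-index set -----------------------------------------------------

theorem contains_outVals (args : List String) (i : Nat) (hi : i < args.length) :
    PySem.Set.contains (outVals args) (i : Int)
      = (decide (1 ≤ i) && isOut (args.getD (i - 1) "")) := by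
  have hmem : ((i : Int) ∈ outVals args) ↔ (1 ≤ i ∧ isOut (args.getD (i - 1) "") = true) := by
    unfold outVals
    rw [PySem.Set.mem_ofList, List.mem_filterMap]
    constructor
    · rintro ⟨p, hp, hf⟩
      rw [PySem.List.slice_to_neg_one, PySem.List.mem_enumerate_iff] at hp
      obtain ⟨k, hk, rfl⟩ := hp
      split at hf
      · rename_i hout
        simp only [Option.some.injEq] at hf
        have hki : i = k + 1 := by omega
        have hlen : k < args.length := by
          have := hk; rw [List.length_dropLast] at this; omega
        refine ⟨by omega, ?_⟩
        have hg : args.getD (i - 1) "" = args.dropLast[k] := by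
          rw [hki]; simp only [Nat.add_sub_cancel]
          rw [List.getD_eq_getElem _ _ hlen, List.getElem_dropLast]
        rw [hg]; simpa [isOut] using hout
      · exact absurd hf (by simp)
    · rintro ⟨h1, hout⟩
      have hk : i - 1 < args.dropLast.length := by rw [List.length_dropLast]; omega
      refine ⟨((0 : Int) + ((i - 1 : Nat) : Int), args.dropLast[i - 1]), ?_, ?_⟩
      · rw [PySem.List.slice_to_neg_one, PySem.List.mem_enumerate_iff]
        exact ⟨i - 1, hk, rfl⟩
      · have hg : args.dropLast[i - 1] = args.getD (i - 1) "" := by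
          rw [List.getElem_dropLast, List.getD_eq_getElem _ "" (by omega)]
        have hc : (args.dropLast[i - 1] == "-o" || args.dropLast[i - 1] == "--output") = true := by
          rw [hg]; simpa [isOut] using hout
        simp only [hc, if_pos]
        congr 1
        omega
  rcases hb : (decide (1 ≤ i) && isOut (args.getD (i - 1) "")) with _ | _
  · rw [Bool.eq_false_iff]
    intro hc
    rw [PySem.Set.contains_iff, hmem] at hc
    rcases Bool.and_eq_false_iff.mp hb with h | h
    · rw [decide_eq_false_iff_not] at h; exact h hc.1
    · rw [hc.2] at h; exact absurd h (by simp)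
  · rw [Bool.and_eq_true, decide_eq_true_iff] at hb
    rw [PySem.Set.contains_iff, hmem]
    exact ⟨hb.1, hb.2⟩

-- A-side, reverse loop ---------------------------------------------------------

theorem gRev_succ (args : List String) (s m : Nat) (h : s ≤ m) :
    gRev args s (m + 1) = if goodIdx args m then some (args.getD m "") else gRev args s m := by
  simp only [gRev]
  rw [if_neg (by omega)]

theorem aRevLoop_eq_gRev (args : List String) :
    ∀ m, m ≤ args.length →
      aRevLoop args (outVals args) (PySem.List.pyRange ((m : Int) - 1) (-1) (-1))
        = gRev args 0 m := by
  intro m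
  induction m with
  | zero =>
    intro _
    rw [PySem.List.pyRange_neg_one_eq_nil (by omega)]
    rfl
  | succ m ih =>
    intro hm
    have hml : m < args.length := by omega
    rw [show ((m + 1 : Nat) : Int) - 1 = (m : Int) by push_cast; ring]
    rw [PySem.List.pyRange_neg_one_cons (by omega)]
    rw [show aRevLoop args (outVals args) ((m : Int) :: PySem.List.pyRange ((m : Int) - 1) (-1) (-1))
        = match PySem.List.pyGet? args (m : Int) with
          | none => none
          | some arg =>
            if PySem.Set.contains (outVals args) (m : Int) then
              aRevLoop args (outVals args) (PySem.List.pyRange ((m : Int) - 1) (-1) (-1))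
            else if endsSrc arg && !(PySem.Str.startswith arg "-") then some arg
            else aRevLoop args (outVals args) (PySem.List.pyRange ((m : Int) - 1) (-1) (-1)) from rfl]
    rw [PySem.List.pyGet?_natCast, List.getElem?_eq_getElem hml]
    rw [contains_outVals args m hml, ih (by omega)]
    rw [gRev_succ args 0 m (by omega)]
    unfold goodIdx
    rw [List.getD_eq_getElem _ "" hml]
    have h0 : decide (m = 0) = !decide (1 ≤ m) := by
      by_cases h : m = 0
      · subst h; decide
      · simp [h]; omega
    rw [h0]
    cases hc1 : decide (1 ≤ m) <;> cases hc2 : isOut (args.getD (m - 1) "") <;>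
      cases he : endsSrc args[m] <;>
        cases hst : PySem.Chars.startswith args[m].toList ['-'] <;>
          simp [he, hst]

-- backward ↔ forward -----------------------------------------------------------

theorem gRev_of_le (args : List String) (s m : Nat) (h : m ≤ s) : gRev args s m = none := by
  cases m with
  | zero => rfl
  | succ m => simp [gRev, h]

theorem gRev_peel (args : List String) :
    ∀ m s, s < m →
      gRev args s m
        = (gRev args (s + 1) m).or
            (if goodIdx args s then some (args.getD s "") else none) := by
  intro m
  induction m with
  | zero => intro s h; omega
  | succ m ih =>
    intro s h
    rcases Nat.lt_or_ge s m with hsm | hsm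
    · rw [gRev_succ args s m (by omega), gRev_succ args (s + 1) m (by omega)]
      split
      · rfl
      · exact ih s hsm
    · have hsm' : s = m := by omega
      subst hsm'
      rw [gRev_succ args s s (le_refl s)]
      rw [gRev_of_le args s s (le_refl s), gRev_of_le args (s + 1) (s + 1) (le_refl _)]
      split <;> rfl

theorem lastGood_eq_gRev (args : List String) :
    ∀ k s, s + k = args.length →
      lastGood (prevAt args s) (args.drop s) = gRev args s args.length := by
  intro k
  induction k with
  | zero =>
    intro s hs
    have : s = args.length := by omega
    subst this
    rw [List.drop_length, gRev_of_le args _ _ (le_refl _)]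
    rfl
  | succ k ih =>
    intro s hs
    have hsl : s < args.length := by omega
    rw [List.drop_eq_getElem_cons hsl]
    rw [show lastGood (prevAt args s) (args[s] :: args.drop (s + 1))
        = match lastGood (some args[s]) (args.drop (s + 1)) with
          | some x => some x
          | none =>
            if !(prevAt args s == some "-o" || prevAt args s == some "--output")
                && endsSrc args[s] && !(PySem.Str.startswith args[s] "-")
            then some args[s] else none from rfl]
    have hprev : (some args[s] : Option String) = prevAt args (s + 1) := by
      rw [show prevAt args (s + 1) = some (args.getD s "") from rfl,
        List.getD_eq_getElem _ "" hsl]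
    rw [hprev, ih (s + 1) (by omega)]
    rw [gRev_peel args args.length s hsl]
    have hok : (!(prevAt args s == some "-o" || prevAt args s == some "--output"))
        = (decide (s = 0) || !(isOut (args.getD (s - 1) ""))) := by
      cases s with
      | zero => simp [prevAt, isOut]
      | succ t => simp [prevAt, isOut]
    have hval : goodIdx args s
        = ((!(prevAt args s == some "-o" || prevAt args s == some "--output"))
            && endsSrc args[s] && !(PySem.Str.startswith args[s] "-")) := by
      rw [hok]
      unfold goodIdx
      rw [List.getD_eq_getElem _ "" hsl]
    cases hg : gRev args (s + 1) args.length with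
    | some x => rfl
    | none =>
      simp only [Option.none_or]
      rw [List.getD_eq_getElem _ "" hsl, ← hprev, hval]

-- ===== VERDICT (by name: the statement is the Claim_ definition above) =====
theorem find_source_argument_py_spec : Claim_equal_find_source_argument_py := by
  intro args _
  unfold Spec_find_source_argument_py
  unfold find_source_argument_py find_source_argument_py_alt
  rw [bLoop_eq, aFirstC_eq_fstC]
  cases hf : fstC none args with
  | some c => rfl
  | none =>
    rw [aRevLoop_eq_gRev args args.length (le_refl _)]
    rw [← lastGood_eq_gRev args args.length 0 (by omega)]
    rw [show prevAt args 0 = none from rfl, List.drop_zero]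
    cases lastGood none args <;> rfl
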